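-- pv_equiv track=rewrite | github.com/kingkaushalagarwal/100daysofcoding | HackerEarthJulyCircuit/wiredSum.py | find
-- ===== SOURCE A (Python) =====
-- def find(arr,summ,k,m,i):
--     if k==0:
--         return summ
--     if i<0:
--         return -1
--     a = find(arr,summ+arr[i]*(k%m),k-1,m,i-1)
--     b =find(arr,summ,k,m,i-1)
--     return max(a,b)
-- ===== SOURCE B (Python) =====
-- def find(arr, summ, k, m, i):
--     # Bottom-up knapsack DP over prefix indices 0..i instead of A's pick/skip branching recursion.
--     if k == 0:
--         return summ
--     if k < 0 or i < 0 or k > i + 1: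
--         return -1
--     # best[r] = max weighted sum choosing exactly r elements from the processed prefix,
--     # where an element chosen while r picks were still pending gets multiplier (r % m).
--     best = [0] + [None] * k
--     for idx in range(i + 1):
--         x = arr[idx]
--         best = [0] + [_omax(best[r], _add(best[r - 1], x * (r % m)))
--                       for r in range(1, k + 1)]
--     return max(-1, summ + best[k])
--
-- def _omax(a, b):
--     if a is None:
--         return b
--     if b is None:
--         return a
--     return max(a, b)
--
-- def _add(a, d):
--     return None if a is None else a + d
-- ===== Notes on version B (the rewrite author's own statement) =====
-- stated objective: alternative
-- what changed: Replaced A's 2^i pick/skip branching recursion by a bottom-up knapsack DP table best[r] (r = pending picks, multiplier r%m), folded once over indices 0..i.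
-- crash fix: On inputs with k!=0, i>=0 and (m==0 or i>=len(arr)) where additionally k<0 or k>i+1, A raises (ZeroDivisionError or IndexError) while B returns -1, since no selection of k elements from indices 0..i exists. — e.g. on find([], 0, 5, 0, 0): A raises IndexError, B returns -1
import Mathlib
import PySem

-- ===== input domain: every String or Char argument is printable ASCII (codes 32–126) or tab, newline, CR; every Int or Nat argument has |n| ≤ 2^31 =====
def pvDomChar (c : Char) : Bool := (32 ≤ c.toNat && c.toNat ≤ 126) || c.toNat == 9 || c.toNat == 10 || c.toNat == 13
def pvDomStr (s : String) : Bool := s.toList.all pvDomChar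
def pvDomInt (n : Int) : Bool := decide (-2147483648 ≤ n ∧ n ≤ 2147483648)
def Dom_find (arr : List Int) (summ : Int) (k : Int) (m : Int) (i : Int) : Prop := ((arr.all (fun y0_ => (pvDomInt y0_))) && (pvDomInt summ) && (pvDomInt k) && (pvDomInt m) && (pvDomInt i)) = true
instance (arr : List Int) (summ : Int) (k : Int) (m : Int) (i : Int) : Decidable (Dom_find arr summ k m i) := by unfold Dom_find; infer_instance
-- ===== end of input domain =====

-- B replaces A's pick/skip branching recursion by a bottom-up knapsack DP table (objective: alternative).

-- ===== PORT A =====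
def find (arr : List Int) (summ : Int) (k : Int) (m : Int) (i : Int) : Int :=
  if k = 0 then summ
  else if i < 0 then -1
  else
    -- arr[i]: Pre_find excludes the IndexError case, so the default 0 is never used there
    let x := (PySem.List.pyGet? arr i).getD 0
    let a := find arr (summ + x * PySem.Int.mod k m) (k - 1) m (i - 1)
    let b := find arr summ k m (i - 1)
    max a b
termination_by (i + 1).toNat
decreasing_by all_goals omega

-- ===== PORT B =====
-- helper _omax of Source B
def pyOmax (a b : Option Int) : Option Int :=
  match a, b with
  | none, b => b
  | some x, none => some x
  | some x, some y => some (max x y)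

-- helper _add of Source B
def pyAddOpt (a : Option Int) (d : Int) : Option Int := a.map (· + d)

def find_alt (arr : List Int) (summ : Int) (k : Int) (m : Int) (i : Int) : Int :=
  if k = 0 then summ
  else if k < 0 ∨ i < 0 ∨ i + 1 < k then -1
  else
    let best := (PySem.List.pyRange 0 (i + 1) 1).foldl
      (fun best idx =>
        let x := (PySem.List.pyGet? arr idx).getD 0   -- arr[idx]; in range under Pre_find
        some 0 :: (PySem.List.pyRange 1 (k + 1) 1).map
          (fun r => pyOmax (best.getD r.toNat none)
                           (pyAddOpt (best.getD (r - 1).toNat none) (x * PySem.Int.mod r m))))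
      (some 0 :: List.replicate k.toNat none)
    -- best[k] is provably `some` here (k ≤ i+1); the default 0 is never used
    max (-1) (summ + (best.getD k.toNat none).getD 0)

-- ===== PRECONDITION & SPEC =====
-- Exactly the inputs on which the Python A returns: otherwise it hits k % 0 (ZeroDivisionError)
-- or arr[i] with i ≥ len(arr) (IndexError).
def Pre_find (arr : List Int) (summ : Int) (k : Int) (m : Int) (i : Int) : Prop :=
  k = 0 ∨ i < 0 ∨ (m ≠ 0 ∧ i < (arr.length : Int))
instance (arr : List Int) (summ : Int) (k : Int) (m : Int) (i : Int) : Decidable (Pre_find arr summ k m i) := by unfold Pre_find; infer_instance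
def pvWitness_find : List Int × Int × Int × Int × Int := ([3, -2, 5], 0, 2, 3, 2)

-- On inputs with k ≠ 0, i ≥ 0 and (m = 0 or i ≥ len(arr)) where additionally k < 0 or k > i+1,
-- A raises (ZeroDivisionError or IndexError) while B returns -1: no selection of k elements exists.
def Raises_find (arr : List Int) (summ : Int) (k : Int) (m : Int) (i : Int) : Prop :=
  (k < 0 ∨ i + 1 < k) ∧ 0 ≤ i ∧ (m = 0 ∨ (arr.length : Int) ≤ i)
instance (arr : List Int) (summ : Int) (k : Int) (m : Int) (i : Int) : Decidable (Raises_find arr summ k m i) := by unfold Raises_find; infer_instance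
def pvRaiseWitness_find : List Int × Int × Int × Int × Int := ([], 0, 5, 0, 0)
def pvRaiseWitnessOut_find : Int := -1

def Spec_find (arr : List Int) (summ : Int) (k : Int) (m : Int) (i : Int) (out : Int) : Prop := out = find_alt arr summ k m i
instance (arr : List Int) (summ : Int) (k : Int) (m : Int) (i : Int) (out : Int) : Decidable (Spec_find arr summ k m i out) := by unfold Spec_find; infer_instance

-- ===== CLAIM (what is proved, stated in full; the proofs are below) =====
def Claim_equal_find : Prop := ∀ (arr : List Int) (summ : Int) (k : Int) (m : Int) (i : Int), Dom_find arr summ k m i → Pre_find arr summ k m i → Spec_find arr summ k m i (find arr summ k m i)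
def Claim_raises_find : Prop := (∀ (arr : List Int) (summ : Int) (k : Int) (m : Int) (i : Int), Dom_find arr summ k m i → Raises_find arr summ k m i → ¬ Pre_find arr summ k m i) ∧ (Dom_find (pvRaiseWitness_find.1) (pvRaiseWitness_find.2.1) (pvRaiseWitness_find.2.2.1) (pvRaiseWitness_find.2.2.2.1) (pvRaiseWitness_find.2.2.2.2) ∧ Raises_find (pvRaiseWitness_find.1) (pvRaiseWitness_find.2.1) (pvRaiseWitness_find.2.2.1) (pvRaiseWitness_find.2.2.2.1) (pvRaiseWitness_find.2.2.2.2) ∧ find_alt (pvRaiseWitness_find.1) (pvRaiseWitness_find.2.1) (pvRaiseWitness_find.2.2.1) (pvRaiseWitness_find.2.2.2.1) (pvRaiseWitness_find.2.2.2.2) = pvRaiseWitnessOut_find)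

-- ===== LEMMAS AND PROOFS =====

-- gmax m r Q: max weighted sum choosing exactly r elements from Q (head chosen first, a choice
-- made with r picks pending weighs x * (r % m)); none if fewer than r elements remain.
def gmax (m : Int) : Nat → List Int → Option Int
  | 0, _ => some 0
  | _ + 1, [] => none
  | r + 1, x :: xs =>
      pyOmax (gmax m (r + 1) xs) (pyAddOpt (gmax m r xs) (x * PySem.Int.mod ((r : Int) + 1) m))

-- A's result for k > 0 in terms of gmax
def AOf (summ : Int) : Option Int → Int
  | none => -1
  | some v => max (-1) (summ + v)

lemma gmax_none_of_lt (m : Int) : ∀ (Q : List Int) (r : Nat), Q.length < r → gmax m r Q = none := by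
  intro Q
  induction Q with
  | nil => intro r h; cases r with
    | zero => omega
    | succ r => rfl
  | cons x xs ih =>
    intro r h
    cases r with
    | zero => simp at h
    | succ r =>
      simp only [List.length_cons] at h
      have h1 : xs.length < r + 1 := by omega
      have h2 : xs.length < r := by omega
      simp [gmax, ih _ h1, ih _ h2, pyOmax, pyAddOpt]

lemma gmax_isSome (m : Int) : ∀ (Q : List Int) (r : Nat), r ≤ Q.length → (gmax m r Q).isSome := by
  intro Q
  induction Q with
  | nil =>
    intro r h
    obtain rfl : r = 0 := by simpa using h
    simp [gmax]
  | cons x xs ih =>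
    intro r h
    cases r with
    | zero => simp [gmax]
    | succ r =>
      simp only [List.length_cons] at h
      have := ih r (by omega)
      obtain ⟨v, hv⟩ := Option.isSome_iff_exists.mp this
      cases hs : gmax m (r + 1) xs <;> simp [gmax, hs, hv, pyOmax, pyAddOpt]

lemma take_succ_reverse {α : Type} (l : List α) (n : Nat) (h : n < l.length) :
    (l.take (n + 1)).reverse = l[n] :: (l.take n).reverse := by
  rw [List.take_succ]
  simp [List.getElem?_eq_getElem h]

lemma AOf_combine (summ w : Int) (pick skip : Option Int) :
    max (AOf (summ + w) pick) (AOf summ skip) = AOf summ (pyOmax skip (pyAddOpt pick w)) := by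
  cases pick <;> cases skip <;>
    simp only [AOf, pyOmax, pyAddOpt, Option.map_some, Option.map_none, max_def] <;>
    split_ifs <;> omega

lemma find_neg (arr : List Int) (m : Int) :
    ∀ (n : Nat) (i summ k : Int), (i + 1).toNat ≤ n → k < 0 → find arr summ k m i = -1 := by
  intro n
  induction n with
  | zero =>
    intro i summ k hn hk
    rw [find]
    simp only [if_neg (by omega : ¬ k = 0)]
    rw [if_pos (by omega : i < 0)]
  | succ n ih =>
    intro i summ k hn hk
    by_cases hi : i < 0
    · rw [find]; simp only [if_neg (by omega : ¬ k = 0)]; rw [if_pos hi]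
    · rw [find]
      simp only [if_neg (by omega : ¬ k = 0), if_neg hi]
      rw [ih (i - 1) _ (k - 1) (by omega) (by omega), ih (i - 1) _ k (by omega) hk]
      simp

lemma findA (arr : List Int) (m : Int) :
    ∀ (n : Nat) (i summ k : Int), (i + 1).toNat ≤ n → 0 < k → i < (arr.length : Int) →
      find arr summ k m i = AOf summ (gmax m k.toNat ((arr.take (i + 1).toNat).reverse)) := by
  intro n
  induction n with
  | zero =>
    intro i summ k hn hk hi
    obtain ⟨r, hr⟩ : ∃ r, k.toNat = r + 1 := ⟨k.toNat - 1, by omega⟩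
    have hi0 : i < 0 := by omega
    have : (i + 1).toNat = 0 := by omega
    rw [find]
    simp only [if_neg (by omega : ¬ k = 0)]
    rw [if_pos hi0, this, hr]
    simp [gmax, AOf]
  | succ n ih =>
    intro i summ k hn hk hi
    obtain ⟨r, hr⟩ : ∃ r, k.toNat = r + 1 := ⟨k.toNat - 1, by omega⟩
    by_cases hi0 : i < 0
    · have : (i + 1).toNat = 0 := by omega
      rw [find]
      simp only [if_neg (by omega : ¬ k = 0)]
      rw [if_pos hi0, this, hr]
      simp [gmax, AOf]
    · -- 0 ≤ i
      have hilen : i.toNat < arr.length := by omega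
      have hx : (PySem.List.pyGet? arr i).getD 0 = arr[i.toNat] := by
        rw [PySem.List.pyGet?_eq_some_getElem arr (by omega) hi]; rfl
      have htake : (i + 1).toNat = i.toNat + 1 := by omega
      have hrev : (arr.take (i + 1).toNat).reverse = arr[i.toNat] :: (arr.take i.toNat).reverse := by
        rw [htake, take_succ_reverse arr i.toNat hilen]
      have hprev : (i - 1 + 1).toNat = i.toNat := by omega
      set x := arr[i.toNat] with hxdef
      set Q := (arr.take i.toNat).reverse with hQ
      have hcast : ((r : Int) + 1) = k := by omega
      -- skip branch
      have hskip : find arr summ k m (i - 1) = AOf summ (gmax m (r + 1) Q) := by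
        rw [ih (i - 1) summ k (by omega) hk (by omega), hprev, ← hr]
      -- pick branch
      have hw : x * PySem.Int.mod k m = x * PySem.Int.mod ((r : Int) + 1) m := by rw [hcast]
      by_cases hk1 : k = 1
      · -- k - 1 = 0 : inner call returns summ' directly
        have hr0 : r = 0 := by omega
        subst hr0
        have hpick : find arr (summ + x * PySem.Int.mod k m) (k - 1) m (i - 1)
            = summ + x * PySem.Int.mod k m := by
          rw [find]; simp [hk1]
        rw [find]
        simp only [if_neg (by omega : ¬ k = 0), if_neg hi0]
        rw [hx, hpick, hskip, hrev, hr]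
        subst hk1
        cases hg : gmax m 1 Q <;>
          simp only [gmax, hg, AOf, pyOmax, pyAddOpt, Option.map_some, Nat.cast_zero,
            zero_add, max_def] <;> split_ifs <;> omega
      · -- k > 1
        have hkr : (k - 1).toNat = r := by omega
        have hpick : find arr (summ + x * PySem.Int.mod k m) (k - 1) m (i - 1)
            = AOf (summ + x * PySem.Int.mod ((r : Int) + 1) m) (gmax m r Q) := by
          rw [ih (i - 1) _ (k - 1) (by omega) (by omega) (by omega), hprev, hkr, hw]
        rw [find]
        simp only [if_neg (by omega : ¬ k = 0), if_neg hi0]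
        rw [hx, hpick, hskip, hrev, hr, AOf_combine]
        rfl

-- table of gmax values, the invariant of B's fold
def tbl (m : Int) (k : Nat) (Q : List Int) : List (Option Int) :=
  (List.range (k + 1)).map (fun r => gmax m r Q)

lemma tbl_nil (m : Int) (k : Nat) : tbl m k [] = some 0 :: List.replicate k none := by
  unfold tbl
  rw [List.range_succ_eq_map, List.map_cons, List.map_map]
  congr 1
  calc (List.range k).map ((fun r => gmax m r []) ∘ Nat.succ)
      = (List.range k).map (fun _ => (none : Option Int)) := by
        apply List.map_congr_left; intro j _; rfl
    _ = List.replicate k none := by simp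

lemma tbl_getD (m : Int) (k : Nat) (Q : List Int) (r : Nat) :
    (tbl m k Q).getD r none = if r ≤ k then gmax m r Q else none := by
  unfold tbl
  rcases le_or_gt r k with h | h
  · rw [if_pos h, List.getD_eq_getElem?_getD, List.getElem?_map, List.getElem?_range (by omega)]
    rfl
  · rw [if_neg (by omega), List.getD_eq_getElem?_getD, List.getElem?_map,
      List.getElem?_eq_none (by simp; omega)]
    rfl

lemma tbl_step (m : Int) (k : Nat) (Q : List Int) (x : Int) :
    (some 0 :: (PySem.List.pyRange 1 ((k : Int) + 1) 1).map
      (fun r => pyOmax ((tbl m k Q).getD r.toNat none)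
                       (pyAddOpt ((tbl m k Q).getD (r - 1).toNat none) (x * PySem.Int.mod r m))))
    = tbl m k (x :: Q) := by
  conv_rhs => rw [tbl, List.range_succ_eq_map, List.map_cons, List.map_map]
  rw [PySem.List.pyRange_one, List.map_map]
  congr 1
  have hlen : ((k : Int) + 1 - 1).toNat = k := by omega
  rw [hlen]
  apply List.map_congr_left
  intro j hj
  have hj' : j < k := List.mem_range.mp hj
  simp only [Function.comp]
  have h1 : ((1 : Int) + (j : Int)).toNat = j + 1 := by omega
  have h2 : ((1 : Int) + (j : Int) - 1).toNat = j := by omega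
  rw [h1, h2, tbl_getD, tbl_getD, if_pos (by omega), if_pos (by omega)]
  show pyOmax (gmax m (j + 1) Q) (pyAddOpt (gmax m j Q) (x * PySem.Int.mod (1 + (j : Int)) m))
      = gmax m (j + 1) (x :: Q)
  have : (1 : Int) + (j : Int) = (j : Int) + 1 := by omega
  rw [this, gmax]

lemma fold_inv (arr : List Int) (m : Int) (k : Nat) :
    ∀ (j : Nat), j ≤ arr.length →
    (PySem.List.pyRange 0 (j : Int) 1).foldl
      (fun best idx =>
        let x := (PySem.List.pyGet? arr idx).getD 0
        some 0 :: (PySem.List.pyRange 1 ((k : Int) + 1) 1).map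
          (fun r => pyOmax (best.getD r.toNat none)
                           (pyAddOpt (best.getD (r - 1).toNat none) (x * PySem.Int.mod r m))))
      (some 0 :: List.replicate k none)
    = tbl m k ((arr.take j).reverse) := by
  intro j
  induction j with
  | zero =>
    intro _
    rw [show ((0 : Nat) : Int) = 0 from rfl, PySem.List.pyRange_one_eq_nil le_rfl]
    simp [tbl_nil]
  | succ j ih =>
    intro hj
    have hcast : ((j + 1 : Nat) : Int) = (j : Int) + 1 := by push_cast; ring
    rw [hcast, PySem.List.pyRange_one_succ_right (a := 0) (b := (j : Int)) (by omega), List.foldl_append,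
      ih (by omega), List.foldl_cons, List.foldl_nil]
    have hx : (PySem.List.pyGet? arr (j : Int)).getD 0 = arr[j] := by
      rw [PySem.List.pyGet?_natCast, List.getElem?_eq_getElem (by omega)]; rfl
    simp only [hx]
    rw [tbl_step, take_succ_reverse arr j (by omega)]
    rfl

-- ===== VERDICT (by name: the statement is the Claim_ definition above) =====
theorem find_spec : Claim_equal_find := by
  intro arr summ k m i _ hpre
  show find arr summ k m i = find_alt arr summ k m i
  by_cases hk0 : k = 0
  · rw [find, find_alt]; simp [hk0]
  by_cases hi0 : i < 0
  · rw [find, find_alt]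
    simp only [if_neg hk0]
    rw [if_pos hi0, if_pos (by omega : k < 0 ∨ i < 0 ∨ i + 1 < k)]
  -- 0 ≤ i; Pre gives m ≠ 0 and i < len
  have hlen : i < (arr.length : Int) := by
    rcases hpre with h | h | h
    · omega
    · omega
    · exact h.2
  by_cases hkneg : k < 0
  · rw [find_neg arr m (i + 1).toNat i summ k (le_refl _) hkneg, find_alt]
    simp only [if_neg hk0]
    rw [if_pos (by omega : k < 0 ∨ i < 0 ∨ i + 1 < k)]
  have hk : 0 < k := by omega
  have hchar := findA arr m (i + 1).toNat i summ k (le_refl _) hk hlen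
  have hRlen : ((arr.take (i + 1).toNat).reverse).length = (i + 1).toNat := by
    simp; omega
  by_cases hbig : i + 1 < k
  · -- not enough elements: both sides -1
    rw [hchar, gmax_none_of_lt m _ k.toNat (by omega), find_alt]
    simp only [if_neg hk0]
    rw [if_pos (by omega : k < 0 ∨ i < 0 ∨ i + 1 < k)]
    rfl
  · -- feasible: unfold B via the fold invariant
    lift k to ℕ using (by omega : (0:Int) ≤ k) with kk
    rw [find_alt]
    simp only [if_neg hk0]
    rw [if_neg (by omega : ¬ (((kk : Int)) < 0 ∨ i < 0 ∨ i + 1 < (kk : Int)))]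
    have hjcast : ((i + 1).toNat : Int) = i + 1 := by omega
    have hfold := fold_inv arr m kk (i + 1).toNat (by omega)
    rw [hjcast] at hfold
    have hkk : ((kk : Int)).toNat = kk := by omega
    simp only [hkk] at hfold hchar ⊢
    rw [hfold, tbl_getD, if_pos (le_refl _)]
    obtain ⟨v, hv⟩ := Option.isSome_iff_exists.mp
      (gmax_isSome m ((arr.take (i + 1).toNat).reverse) kk (by rw [hRlen]; omega))
    rw [hchar, hv]
    simp [AOf]

@[simp]
theorem find_raises : Claim_raises_find := by
  unfold Claim_raises_find
  constructor
  · intro arr summ k m i _ hr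
    unfold Raises_find at hr
    unfold Pre_find
    obtain ⟨h1, h2, h3⟩ := hr
    rintro (h | h | ⟨hm, hl⟩) <;> omega
  · exact ⟨by decide, by decide, by decide⟩
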